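-- pv_equiv track=rewrite | github.com/blake663/leetcode-solutions | 3954-MaximumBalancedShipments/3954-MaximumBalancedShipments.py | maxBalancedShipments
-- ===== SOURCE A (Python) =====
-- from typing import List
--
-- def maxBalancedShipments(weight: List[int]) -> int:
--     n = len(weight)
--     i = 1
--     cnt = 0
--     while i < n:
--         if weight[i-1] > weight[i]:
--             cnt += 1
--             i += 2
--         else:
--             i += 1
--     return cnt
-- ===== SOURCE B (Python) =====
-- def maxBalancedShipments(weight):
--     # Bottom-up DP over suffixes: p1 = best for suffix starting at k, p2 = suffix at k+1.
--     p2 = p1 = 0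
--     for k in range(len(weight) - 2, -1, -1):
--         if weight[k] > weight[k + 1]:
--             cur = max(p1, p2 + 1)
--         else:
--             cur = max(p1, p2)
--         p2, p1 = p1, cur
--     return p1
-- ===== Notes on version B (the rewrite author's own statement) =====
-- stated objective: alternative
-- what changed: Replaces the interleaved greedy while-loop (skip two indices after taking a pair) with a bottom-up dynamic program over suffixes keeping two rolling values dp[k]=max(dp[k+1], dp[k+2]+1 if weight[k]>weight[k+1]).
import Mathlib
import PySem

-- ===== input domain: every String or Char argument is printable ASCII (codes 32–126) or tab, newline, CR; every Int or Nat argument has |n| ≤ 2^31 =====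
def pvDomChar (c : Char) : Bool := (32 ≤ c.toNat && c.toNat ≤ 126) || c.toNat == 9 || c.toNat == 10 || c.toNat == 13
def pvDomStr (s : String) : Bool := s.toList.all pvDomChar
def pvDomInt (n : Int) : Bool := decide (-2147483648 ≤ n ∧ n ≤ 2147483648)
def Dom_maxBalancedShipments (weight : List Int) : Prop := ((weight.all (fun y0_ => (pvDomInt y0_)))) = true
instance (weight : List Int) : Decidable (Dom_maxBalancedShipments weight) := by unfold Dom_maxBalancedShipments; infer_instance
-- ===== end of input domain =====

-- ===== PORT A =====
-- B replaces A's interleaved greedy pass with a bottom-up suffix DP (alternative decomposition, same O(n) cost).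
-- A's while loop over index i, transliterated as recursion on the distance n - i.
-- indices i-1 and i are always in range (1 <= i < n), so the pyGetD default 0 is never used
def loopA (w : List Int) (n : Int) : Nat → Int → Int → Int
  | 0, _, cnt => cnt  -- fuel only for totality; n - i > 0 forces fuel > 0 at every entry
  | fuel + 1, i, cnt =>
    if i < n then
      if PySem.List.pyGetD w (i - 1) 0 > PySem.List.pyGetD w i 0 then
        loopA w n fuel (i + 2) (cnt + 1)
      else
        loopA w n fuel (i + 1) cnt
    else cnt

def maxBalancedShipments (weight : List Int) : Int :=
  loopA weight (weight.length : Int) weight.length 1 0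

-- ===== PORT B =====
-- B's backward loop over k = n-2 .. 0 with rolling (p2, p1) = (dp at k+2, dp at k+1),
-- transcribed as structural recursion over the list: dpPair l = (dp at l, dp at l.tail).
def dpPair : List Int → Int × Int
  | [] => (0, 0)
  | [_] => (0, 0)
  | a :: b :: r =>
    let p := dpPair (b :: r)
    (if a > b then max p.1 (p.2 + 1) else max p.1 p.2, p.1)

def maxBalancedShipments_alt (weight : List Int) : Int :=
  (dpPair weight).1

-- ===== PRECONDITION & SPEC =====
def Spec_maxBalancedShipments (weight : List Int) (out : Int) : Prop := out = maxBalancedShipments_alt weight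
instance (weight : List Int) (out : Int) : Decidable (Spec_maxBalancedShipments weight out) := by unfold Spec_maxBalancedShipments; infer_instance

-- ===== CLAIM (what is proved, stated in full; the proofs are below) =====
def Claim_equal_maxBalancedShipments : Prop := ∀ (weight : List Int), Dom_maxBalancedShipments weight → Spec_maxBalancedShipments weight (maxBalancedShipments weight)

-- ===== LEMMAS AND PROOFS =====

-- Functional characterisation of A's greedy scan.
def g : List Int → Int
  | [] => 0
  | [_] => 0
  | a :: b :: r => if a > b then 1 + g r else g (b :: r)

theorem g_short (l : List Int) (h : l.length ≤ 1) : g l = 0 := by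
  match l with
  | [] => simp [g]
  | [_] => simp [g]
  | _ :: _ :: _ => simp at h

-- Prepending one element keeps the greedy count, or raises it by exactly one.
theorem g_bounds : ∀ (l : List Int) (x : Int), g l ≤ g (x :: l) ∧ g (x :: l) ≤ g l + 1
  | [], x => by simp [g]
  | c :: r, x => by
    have ih := g_bounds r c
    by_cases h : x > c <;> (simp [g, h]; try omega)

theorem dpPair_eq : ∀ l : List Int, (dpPair l).1 = g l ∧ (dpPair l).2 = g l.tail
  | [] => by simp [dpPair, g]
  | [a] => by simp [dpPair, g]
  | a :: b :: r => by
    have ih := dpPair_eq (b :: r)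
    have hb := g_bounds r b
    simp only [List.tail_cons] at ih
    by_cases h : a > b <;>
      simp [dpPair, g, h, ih.1, ih.2] <;> omega

theorem loopA_eq (w : List Int) (fuel : Nat) (i cnt : Int) (h1 : 1 ≤ i)
    (hf : (w.length : Int) - i ≤ fuel) :
    loopA w (w.length : Int) fuel i cnt = cnt + g (w.drop (i - 1).toNat) := by
  induction fuel generalizing i cnt with
  | zero =>
    rw [loopA, g_short]
    · ring
    · simp; omega
  | succ fuel ih =>
    rw [loopA]
    by_cases h : i < (w.length : Int)
    · have hi1 : (i - 1).toNat < w.length := by omega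
      have hi : i.toNat < w.length := by omega
      have e1 : (i - 1).toNat + 1 = i.toNat := by omega
      have e2 : i.toNat + 1 = (i + 1).toNat := by omega
      have hdrop : w.drop (i - 1).toNat =
          w[(i - 1).toNat] :: w[i.toNat] :: w.drop (i + 1).toNat := by
        rw [List.drop_eq_getElem_cons hi1, e1, List.drop_eq_getElem_cons hi, e2]
      have hg1 : PySem.List.pyGetD w (i - 1) 0 = w[(i - 1).toNat] :=
        PySem.List.pyGetD_eq_getElem w 0 (by omega) (by omega)
      have hg2 : PySem.List.pyGetD w i 0 = w[i.toNat] :=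
        PySem.List.pyGetD_eq_getElem w 0 (by omega) (by omega)
      rw [hdrop, hg1, hg2]
      have hgcons : g (w[(i - 1).toNat] :: w[i.toNat] :: w.drop (i + 1).toNat) =
          if w[(i - 1).toNat] > w[i.toNat] then 1 + g (w.drop (i + 1).toNat)
          else g (w[i.toNat] :: w.drop (i + 1).toNat) := by
        rw [g]
      by_cases hcmp : w[(i - 1).toNat] > w[i.toNat]
      · rw [if_pos h, if_pos hcmp, hgcons, if_pos hcmp,
          ih (i + 2) (cnt + 1) (by omega) (by omega),
          show (i + 2 - 1).toNat = (i + 1).toNat from by omega]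
        ring
      · rw [if_pos h, if_neg hcmp, hgcons, if_neg hcmp,
          ih (i + 1) cnt (by omega) (by omega),
          show (i + 1 - 1).toNat = i.toNat from by omega,
          List.drop_eq_getElem_cons hi, e2]
    · rw [if_neg h, g_short]
      · ring
      · simp; omega

-- ===== VERDICT (by name: the statement is the Claim_ definition above) =====
theorem maxBalancedShipments_spec : Claim_equal_maxBalancedShipments := by
  intro w _
  unfold Spec_maxBalancedShipments maxBalancedShipments maxBalancedShipments_alt
  rw [loopA_eq w w.length 1 0 (by omega) (by omega), (dpPair_eq w).1]
  simp
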